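-- pv_equiv track=rewrite | github.com/kanekiblt/Sistema-de-numeraci-n | 1. Sistema de numeracion.py | oct_a_bcd
-- ===== SOURCE A (Python) =====
-- def oct_a_bcd(octal):
--     try:
--         decimal = int(octal, 8)
--         bcd_num = ""
--         while decimal > 0:
--             bcd_num = str(decimal % 10) + bcd_num
--             decimal //= 10
--         return bcd_num
--     except ValueError:
--         return "Error"
-- ===== SOURCE B (Python) =====
-- def oct_a_bcd(octal):
--     try:
--         return str(int(octal, 8))
--     except ValueError:
--         return "Error"
-- ===== Notes on version B (the rewrite author's own statement) =====
-- stated objective: simpler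
-- what changed: B replaces A's manual digit-by-digit base-10 decomposition while-loop with Python's builtin str() on the parsed value, keeping the same base-8 int parsing and the same ValueError fallback.
-- intended difference: On strings that parse as base-8 integers with value <= 0 (such as '0' or '-17'), A returns an empty string because its digit-extraction loop never runs, while B returns the standard decimal rendering ('0', '-15'), which is the intended conversion. — e.g. on oct_a_bcd("0"): A returns "", B returns "0"
import Mathlib
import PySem

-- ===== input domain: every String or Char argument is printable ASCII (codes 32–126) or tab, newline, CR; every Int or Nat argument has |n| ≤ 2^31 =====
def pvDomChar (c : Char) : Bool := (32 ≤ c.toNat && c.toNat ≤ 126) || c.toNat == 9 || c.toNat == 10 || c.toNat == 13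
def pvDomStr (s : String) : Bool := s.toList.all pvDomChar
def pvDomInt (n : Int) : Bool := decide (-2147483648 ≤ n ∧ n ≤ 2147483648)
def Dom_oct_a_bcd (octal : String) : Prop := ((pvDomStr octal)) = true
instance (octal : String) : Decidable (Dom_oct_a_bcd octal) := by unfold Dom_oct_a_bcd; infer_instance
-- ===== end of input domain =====

-- B replaces A's manual digit-by-digit base-10 decomposition loop with the builtin str();
-- on nonpositive octal values A's loop never runs and returns "", B returns the decimal string (see D_ below).

-- ===== PORT A =====
-- termination fact for A's while loop (cited by name in decreasing_by)
theorem pvFdiv10_lt (d : Int) (h : 0 < d) : (d.fdiv 10).toNat < d.toNat := by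
  rw [Int.fdiv_eq_ediv]; omega

-- A's while loop: prepend decimal % 10 as a character, floor-divide by 10
def octALoop (decimal : Int) (bcd_num : String) : String :=
  if h : 0 < decimal then
    octALoop (PySem.Int.floordiv decimal 10)
             (PySem.Int.toStr (PySem.Int.mod decimal 10) ++ bcd_num)
  else bcd_num
termination_by decimal.toNat
decreasing_by simp only [PySem.Int.floordiv]; exact pvFdiv10_lt _ h

def oct_a_bcd (octal : String) : String :=
  match PySem.Int.ofStrBase? octal 8 with          -- int(octal, 8); none = ValueError
  | some decimal => octALoop decimal ""
  | none => "Error"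

-- ===== PORT B =====
def oct_a_bcd_alt (octal : String) : String :=
  match PySem.Int.ofStrBase? octal 8 with          -- int(octal, 8); none = ValueError
  | some decimal => PySem.Int.toStr decimal        -- str(decimal)
  | none => "Error"

-- ===== PRECONDITION & SPEC =====
-- On strings that parse as base-8 integers with value ≤ 0 (such as '0' or '-17'), A returns an
-- empty string because its digit-extraction loop never runs, while B returns the standard decimal
-- rendering ('0', '-15'), which is the intended conversion.
def D_oct_a_bcd (octal : String) : Prop :=
  ((PySem.Int.ofStrBase? octal 8).any (fun v => decide (v ≤ 0))) = true
instance (octal : String) : Decidable (D_oct_a_bcd octal) := by unfold D_oct_a_bcd; infer_instance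

def Spec_oct_a_bcd (octal : String) (out : String) : Prop :=
  ¬ D_oct_a_bcd octal → out = oct_a_bcd_alt octal
instance (octal : String) (out : String) : Decidable (Spec_oct_a_bcd octal out) := by
  unfold Spec_oct_a_bcd; infer_instance

def pvDiffWitness_oct_a_bcd : String := "0"
def pvDiffWitnessOut_oct_a_bcd : String × String := ("", "0")

-- ===== CLAIM (what is proved, stated in full; the proofs are below) =====
def Claim_unchanged_oct_a_bcd : Prop :=
  ∀ (octal : String), Dom_oct_a_bcd octal → Spec_oct_a_bcd octal (oct_a_bcd octal)
def Claim_changed_oct_a_bcd : Prop :=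
  Dom_oct_a_bcd (pvDiffWitness_oct_a_bcd) ∧ D_oct_a_bcd (pvDiffWitness_oct_a_bcd) ∧
  oct_a_bcd (pvDiffWitness_oct_a_bcd) = pvDiffWitnessOut_oct_a_bcd.1 ∧
  oct_a_bcd_alt (pvDiffWitness_oct_a_bcd) = pvDiffWitnessOut_oct_a_bcd.2 ∧
  pvDiffWitnessOut_oct_a_bcd.1 ≠ pvDiffWitnessOut_oct_a_bcd.2
def Claim_exact_oct_a_bcd : Prop :=
  ∀ (octal : String), Dom_oct_a_bcd octal → D_oct_a_bcd octal →
    oct_a_bcd octal ≠ oct_a_bcd_alt octal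

-- ===== LEMMAS AND PROOFS =====
theorem ofList_append (l m : List Char) :
    String.ofList (l ++ m) = String.ofList l ++ String.ofList m := by
  apply String.ext; simp

theorem fdiv_cast (n : Nat) : Int.fdiv (n : Int) 10 = ((n / 10 : Nat) : Int) := by
  rw [Int.fdiv_eq_ediv]; simp

theorem fmod_cast (n : Nat) : Int.fmod (n : Int) 10 = ((n % 10 : Nat) : Int) := by
  rw [Int.fmod_eq_emod]; simp

theorem toStr_nat (n : Nat) : PySem.Int.toStr (n : Int) = String.ofList (Nat.toDigits 10 n) := by
  simp only [PySem.Int.toStr, PySem.Int.toChars]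
  rw [if_neg (Int.not_lt.mpr (Int.natCast_nonneg n))]
  simp

theorem octALoop_nonpos (d : Int) (hd : ¬ 0 < d) (acc : String) : octALoop d acc = acc := by
  rw [octALoop, dif_neg hd]

-- A's loop, run on a positive value, produces exactly the decimal digit string
theorem octALoop_eq (n : Nat) (hn : 0 < n) :
    ∀ acc, octALoop (n : Int) acc = String.ofList (Nat.toDigits 10 n) ++ acc := by
  induction n using Nat.strong_induction_on with
  | _ n ih =>
    intro acc
    rw [octALoop, dif_pos (show (0:Int) < (n:Int) by exact_mod_cast hn)]
    simp only [PySem.Int.floordiv, PySem.Int.mod, fdiv_cast, fmod_cast, toStr_nat]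
    rw [Nat.toDigits_of_lt_base (Nat.mod_lt n (by omega))]
    by_cases h10 : n < 10
    · rw [Nat.div_eq_of_lt h10, octALoop_nonpos _ (by simp), Nat.mod_eq_of_lt h10,
        Nat.toDigits_of_lt_base h10]
    · have hq : 0 < n / 10 := Nat.div_pos (by omega) (by omega)
      rw [ih (n / 10) (Nat.div_lt_self hn (by omega)) hq,
        Nat.toDigits_eq_if (b := 10) (n := n) (by omega), if_neg h10,
        ofList_append, String.append_assoc]

theorem toStr_ne_empty (d : Int) : PySem.Int.toStr d ≠ "" := by
  simp only [PySem.Int.toStr, PySem.Int.toChars]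
  intro h
  have h2 := congrArg String.toList h
  simp at h2
  split at h2
  · exact List.cons_ne_nil _ _ h2
  · have hl := Nat.length_toDigits_pos (b := 10) (n := d.toNat)
    rw [h2] at hl
    simp at hl

-- ===== VERDICT (by name: the statement is the Claim_ definition above) =====
theorem oct_a_bcd_spec : Claim_unchanged_oct_a_bcd := by
  intro octal _ hD
  unfold oct_a_bcd oct_a_bcd_alt
  cases h : PySem.Int.ofStrBase? octal 8 with
  | none => rfl
  | some d =>
    dsimp only
    have hd : 0 < d := by
      by_contra hle
      exact hD (by simp [D_oct_a_bcd, h]; omega)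
    have hcast : ((d.toNat : Int)) = d := Int.toNat_of_nonneg (by omega)
    rw [← hcast, octALoop_eq d.toNat (by omega), toStr_nat]
    simp

theorem oct_a_bcd_changed : Claim_changed_oct_a_bcd := by
  unfold Claim_changed_oct_a_bcd
  refine ⟨by decide, by decide, ?_, by decide, by decide⟩
  show oct_a_bcd "0" = ""
  unfold oct_a_bcd
  rw [show PySem.Int.ofStrBase? "0" 8 = some 0 from by decide]
  exact octALoop_nonpos 0 (by omega) ""

theorem oct_a_bcd_tight : Claim_exact_oct_a_bcd := by
  intro octal _ hD
  unfold D_oct_a_bcd at hD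
  unfold oct_a_bcd oct_a_bcd_alt
  cases h : PySem.Int.ofStrBase? octal 8 with
  | none => simp [h] at hD
  | some d =>
    rw [h] at hD
    simp at hD
    dsimp only
    rw [octALoop_nonpos d (by omega)]
    exact fun he => toStr_ne_empty d he.symm
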